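-- pv_equiv track=rewrite | github.com/kcierzan/rigel | projects/wtgen/tests/unit/format/test_properties.py | mip_frame_lengths
-- ===== SOURCE A (Python) =====
-- def mip_frame_lengths(base_length: int, num_mips: int) -> list[int]:
--     """Generate decreasing mip frame lengths starting from base_length.
--
--     This is a pure function, not a strategy, since it deterministically
--     calculates mip levels from the base length.
--     """
--     lengths = [base_length]
--     current = base_length
--     for _ in range(num_mips - 1):
--         current = current // 2
--         if current < 4:
--             break
--         lengths.append(current)
--     return lengths
-- ===== SOURCE B (Python) =====
-- def mip_frame_lengths(base_length: int, num_mips: int) -> list[int]: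
--     if base_length < 8 or num_mips <= 1:
--         return [base_length]
--     count = min(num_mips - 1, base_length.bit_length() - 3)
--     return [base_length >> i for i in range(count + 1)]
-- ===== Notes on version B (the rewrite author's own statement) =====
-- stated objective: alternative
-- what changed: Replaces A's halve-test-break loop (mutating current and appending) by a closed-form count of mip levels from bit_length plus a direct shift-indexed list comprehension.
import Mathlib
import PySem

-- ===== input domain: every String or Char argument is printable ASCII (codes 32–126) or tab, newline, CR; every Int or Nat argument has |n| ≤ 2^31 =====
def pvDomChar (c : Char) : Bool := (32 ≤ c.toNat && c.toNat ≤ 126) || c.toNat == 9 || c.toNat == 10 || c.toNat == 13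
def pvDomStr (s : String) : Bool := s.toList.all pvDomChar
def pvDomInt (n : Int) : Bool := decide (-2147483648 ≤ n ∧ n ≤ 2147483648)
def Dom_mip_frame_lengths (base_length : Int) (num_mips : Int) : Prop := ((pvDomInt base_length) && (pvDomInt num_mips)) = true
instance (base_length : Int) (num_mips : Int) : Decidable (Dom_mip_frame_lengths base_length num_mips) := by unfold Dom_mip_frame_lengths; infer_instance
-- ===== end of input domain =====

-- B replaces A's halve-test-break loop by a closed-form count (bit_length) plus a direct
-- shift-indexed list build; objective: simpler/alternative, not claimed faster.

-- ===== PORT A =====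
-- the for-loop with break, as fuel recursion over range(num_mips - 1)
def mipLoop (fuel : Nat) (current : Int) (lengths : List Int) : List Int :=
  match fuel with
  | 0 => lengths
  | n + 1 =>
    let c := PySem.Int.floordiv current 2
    if c < 4 then lengths else mipLoop n c (lengths ++ [c])

def mip_frame_lengths (base_length : Int) (num_mips : Int) : List Int :=
  mipLoop (num_mips - 1).toNat base_length [base_length]

-- ===== PORT B =====
def mip_frame_lengths_alt (base_length : Int) (num_mips : Int) : List Int :=
  if base_length < 8 ∨ num_mips ≤ 1 then [base_length]
  else
    -- count = min(num_mips - 1, bit_length - 3); [base_length >> i for i in range(count + 1)];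
    -- i ≥ 0 here, so '>> i' is '>>> i.toNat'
    (PySem.List.pyRange 0 (min (num_mips - 1) ((PySem.Int.bitLength base_length : Int) - 3) + 1) 1).map
      (fun i => base_length >>> i.toNat)

-- ===== PRECONDITION & SPEC =====
def Spec_mip_frame_lengths (base_length : Int) (num_mips : Int) (out : List Int) : Prop := out = mip_frame_lengths_alt base_length num_mips
instance (base_length : Int) (num_mips : Int) (out : List Int) : Decidable (Spec_mip_frame_lengths base_length num_mips out) := by unfold Spec_mip_frame_lengths; infer_instance

-- ===== CLAIM (what is proved, stated in full; the proofs are below) =====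
def Claim_equal_mip_frame_lengths : Prop := ∀ (base_length : Int) (num_mips : Int), Dom_mip_frame_lengths base_length num_mips → Spec_mip_frame_lengths base_length num_mips (mip_frame_lengths base_length num_mips)

-- ===== LEMMAS AND PROOFS =====

-- number of further mip levels A will emit from a current value c (unbounded fuel)
def nh (c : Int) : Nat := if 8 ≤ c then PySem.Int.bitLength c - 3 else 0

def halve (c : Int) : Int := PySem.Int.floordiv c 2

lemma halve_lt_four_iff (c : Int) : halve c < 4 ↔ c < 8 := by
  rw [halve, PySem.Int.floordiv_lt_iff_lt_mul (by norm_num)]; norm_num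

lemma le_halve_iff (q c : Int) : q ≤ halve c ↔ q * 2 ≤ c := by
  rw [halve, PySem.Int.le_floordiv_iff_mul_le (by norm_num)]

lemma bitLength_ge (c : Int) (k : Nat) (h : (2:Int) ^ k ≤ c) :
    k < PySem.Int.bitLength c := by
  have h1 := PySem.Int.lt_two_pow_bitLength c
  have hc0 : (0:Int) ≤ c := le_trans (by positivity) h
  have h2 : (2:Nat) ^ k ≤ c.natAbs := by
    zify
    rw [abs_of_nonneg hc0]
    exact_mod_cast h
  exact (Nat.pow_lt_pow_iff_right (by norm_num)).mp (lt_of_le_of_lt h2 h1)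

lemma bitLength_eq (c : Int) (k : Nat) (hlo : (2:Int) ^ k ≤ c) (hhi : c < 2 ^ (k+1)) :
    PySem.Int.bitLength c = k + 1 := by
  have hge := bitLength_ge c k hlo
  have hcpos : (0:Int) < c := lt_of_lt_of_le (by positivity) hlo
  have h2 := PySem.Int.two_pow_bitLength_le c (by omega)
  have h3 : c.natAbs < 2 ^ (k+1) := by
    zify
    rw [abs_of_nonneg (le_of_lt hcpos)]
    exact_mod_cast hhi
  have : 2 ^ (PySem.Int.bitLength c - 1) < 2 ^ (k+1) := lt_of_le_of_lt h2 h3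
  have := (Nat.pow_lt_pow_iff_right (a := 2) (by norm_num)).mp this
  omega

lemma nh_step (c : Int) (h : 8 ≤ c) : nh c = nh (halve c) + 1 := by
  have hpos : 0 < c := by omega
  have hbl : PySem.Int.bitLength c = PySem.Int.bitLength (halve c) + 1 :=
    PySem.Int.bitLength_of_pos hpos
  by_cases h16 : 16 ≤ c
  · have h8 : 8 ≤ halve c := (le_halve_iff 8 c).mpr (by omega)
    have hbl4 : 4 ≤ PySem.Int.bitLength (halve c) := bitLength_ge (halve c) 3 (by norm_num; omega)
    simp only [nh, if_pos h, if_pos h8]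
    omega
  · have h8 : ¬ 8 ≤ halve c := by
      intro hc; have := (le_halve_iff 8 c).mp hc; omega
    have h4 : PySem.Int.bitLength c = 4 := bitLength_eq c 3 (by norm_num; omega) (by norm_num; omega)
    simp only [nh, if_pos h, if_neg h8]
    omega

lemma shiftRight_nonneg_succ (n : Int) (hn : 0 ≤ n) (k : Nat) :
    n >>> ((k : Int) + 1) = (halve n) >>> (k : Int) := by
  obtain ⟨a, rfl⟩ := Int.eq_ofNat_of_zero_le hn
  have h1 : halve (a : Int) = ((a / 2 : Nat) : Int) := by
    simp [halve]
  rw [h1, show ((k : Int) + 1) = ((k + 1 : Nat) : Int) by push_cast; ring]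
  rw [Int.shiftRight_natCast, Int.shiftRight_natCast]
  congr 1
  simp [Nat.shiftRight_eq_div_pow, Nat.div_div_eq_div_mul, pow_succ']

lemma shiftRight_eq_iterate (n : Int) (hn : 0 ≤ n) (k : Nat) :
    n >>> (k : Int) = halve^[k] n := by
  induction k generalizing n with
  | zero =>
    obtain ⟨a, rfl⟩ := Int.eq_ofNat_of_zero_le hn
    rw [Int.shiftRight_natCast]
    simp
  | succ k ih =>
    rw [show (((k + 1 : Nat)) : Int) = ((k : Int) + 1) by push_cast; ring]
    rw [shiftRight_nonneg_succ n hn k, Function.iterate_succ_apply]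
    have h0 : 0 ≤ halve n := by rw [le_halve_iff]; omega
    exact ih (halve n) h0

lemma mipLoop_eq (f : Nat) (c : Int) (acc : List Int) :
    mipLoop f c acc = acc ++ (List.range (min f (nh c))).map (fun i => halve^[i+1] c) := by
  induction f generalizing c acc with
  | zero => simp [mipLoop]
  | succ n ih =>
    rw [mipLoop]
    by_cases hlt : halve c < 4
    · have hc8 : c < 8 := (halve_lt_four_iff c).mp hlt
      have : nh c = 0 := by simp [nh]; omega
      simp [halve, this] at hlt ⊢
      simp [hlt]
    · have hc8 : 8 ≤ c := by
        by_contra hc; exact hlt ((halve_lt_four_iff c).mpr (by omega))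
      rw [if_neg (show ¬ PySem.Int.floordiv c 2 < 4 from hlt)]
      have hfold : PySem.Int.floordiv c 2 = halve c := rfl
      rw [hfold, ih]
      rw [nh_step c hc8]
      rw [show min (n+1) (nh (halve c) + 1) = min n (nh (halve c)) + 1 by omega]
      rw [List.range_succ_eq_map, List.append_assoc]
      congr 1
      simp only [List.map_cons, List.map_map, List.singleton_append]
      refine List.cons_eq_cons.mpr ⟨by simp, ?_⟩
      apply List.map_congr_left
      intro i _
      simp only [Function.comp_apply, Nat.succ_eq_add_one]
      rw [Function.iterate_succ_apply, Function.iterate_succ_apply]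
      exact (Function.iterate_succ_apply _ _ _).symm

-- ===== VERDICT (by name: the statement is the Claim_ definition above) =====
theorem mip_frame_lengths_spec : Claim_equal_mip_frame_lengths := by
  intro b m _
  unfold Spec_mip_frame_lengths mip_frame_lengths mip_frame_lengths_alt
  by_cases hb : b < 8 ∨ m ≤ 1
  · rw [if_pos hb]
    rcases hb with hb | hm
    · have : nh b = 0 := by simp [nh]; omega
      rw [mipLoop_eq]; simp [this]
    · have : (m - 1).toNat = 0 := by omega
      rw [this]; simp [mipLoop]
  · rw [if_neg hb]
    push Not at hb
    obtain ⟨hb8, hm2⟩ := hb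
    have hbl4 : 4 ≤ PySem.Int.bitLength b := bitLength_ge b 3 (by norm_num; omega)
    rw [mipLoop_eq, PySem.List.pyRange_one]
    have hcnt : ((min (m - 1) ((PySem.Int.bitLength b : Int) - 3) + 1) - 0).toNat
        = min (m-1).toNat (nh b) + 1 := by
      simp [nh, if_pos hb8]; omega
    rw [hcnt, List.range_succ_eq_map]
    simp only [List.map_map, List.map_cons, List.singleton_append]
    refine List.cons_eq_cons.mpr ⟨?_, ?_⟩
    · rw [show ((0:Int) + ((0:Nat) : Int)).toNat = (0:Nat) by simp]
      rw [show (((0:Nat) : Nat) : Int) = ((0:Nat) : Int) from rfl]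
      rw [shiftRight_eq_iterate b (by omega) 0]
      simp
    · apply List.map_congr_left
      intro i _
      simp only [Function.comp_apply, zero_add, Nat.succ_eq_add_one, Int.toNat_natCast]
      rw [shiftRight_eq_iterate b (by omega)]
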